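-- pv_equiv track=rewrite | github.com/subinmun1997/my_python-for-coding-test | BAEKJOON/solution405.py | oper
-- ===== SOURCE A (Python) =====
-- def oper(a, b):
--     total = 1
--     for i in range(a, b+1):
--         plus = 0
--         for j in range(1, i+1):
--             plus += j
--         total *= plus
--     return total
-- ===== SOURCE B (Python) =====
-- def oper(a, b):
--     # product of triangular numbers T(i)=i*(i+1)/2 for i in [a,b]:
--     # prod T(i) = (prod_{a..b} i)*(prod_{a+1..b+1} i)/2^n = P*P/(a*(b+1)*2^n)
--     # where P = prod_{a..b+1} i and n = b-a+1 (exact division).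
--     if b < a:
--         return 1
--     if a <= 0:
--         return 0
--     p = 1
--     for i in range(a, b + 2):
--         p *= i
--     return p * p // (a * (b + 1) * 2 ** (b - a + 1))
-- ===== Notes on version B (the rewrite author's own statement) =====
-- stated objective: alternative
-- what changed: instead of A's nested summation loop, B computes a single falling product P = a*(a+1)*...*(b+1) and obtains the whole answer as P*P // (a*(b+1)*2^(b-a+1)), an exact closed-form identity for the product of triangular numbers
import Mathlib
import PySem

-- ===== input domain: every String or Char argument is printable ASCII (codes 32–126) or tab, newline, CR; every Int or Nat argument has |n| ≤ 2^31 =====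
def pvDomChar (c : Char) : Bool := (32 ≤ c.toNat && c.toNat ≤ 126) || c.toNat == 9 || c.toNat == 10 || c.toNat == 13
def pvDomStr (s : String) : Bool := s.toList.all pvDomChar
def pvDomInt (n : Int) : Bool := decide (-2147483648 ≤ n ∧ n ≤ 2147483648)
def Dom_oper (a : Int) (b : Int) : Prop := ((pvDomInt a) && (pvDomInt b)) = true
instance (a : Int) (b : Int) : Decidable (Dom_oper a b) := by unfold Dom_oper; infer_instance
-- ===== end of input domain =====

-- B avoids A's nested summation loop entirely: it computes one falling product
-- P = a*(a+1)*...*(b+1) and returns P*P // (a*(b+1)*2^(b-a+1)), an exact identity.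

-- ===== PORT A =====
def oper (a : Int) (b : Int) : Int :=
  (PySem.List.pyRange a (b + 1) 1).foldl
    (fun total i =>
      total * ((PySem.List.pyRange 1 (i + 1) 1).foldl (fun plus j => plus + j) 0))
    1

-- ===== PORT B =====
-- Python's '2 ** (b - a + 1)' has a nonnegative exponent here (a ≤ b), so the
-- '.toNat' on the exponent is exact.
def oper_alt (a : Int) (b : Int) : Int :=
  if b < a then 1
  else if a ≤ 0 then 0
  else
    let p := (PySem.List.pyRange a (b + 2) 1).foldl (fun p i => p * i) 1
    PySem.Int.floordiv (p * p) (a * (b + 1) * 2 ^ (b - a + 1).toNat)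

-- ===== PRECONDITION & SPEC =====
def Spec_oper (a : Int) (b : Int) (out : Int) : Prop := out = oper_alt a b
instance (a : Int) (b : Int) (out : Int) : Decidable (Spec_oper a b out) := by unfold Spec_oper; infer_instance

-- ===== CLAIM =====
def Claim_equal_oper : Prop := ∀ (a : Int) (b : Int), Dom_oper a b → Spec_oper a b (oper a b)

-- ===== LEMMAS AND PROOFS =====

-- A's inner loop is the triangular number, for i ≥ 1
theorem inner_sum_closed (i : Int) (hi : 1 ≤ i) :
    (PySem.List.pyRange 1 (i + 1) 1).foldl (fun plus j => plus + j) 0 =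
      PySem.Int.floordiv (i * (i + 1)) 2 := by
  obtain ⟨n, rfl⟩ : ∃ n : ℕ, i = (n : Int) + 1 := ⟨(i - 1).toNat, by omega⟩
  induction n with
  | zero => decide
  | succ m ih =>
    have h1 : (1 : Int) ≤ (m : Int) + 1 := by omega
    push_cast
    rw [show ((m : Int) + 1 + 1 + 1) = (((m : Int) + 1 + 1) + 1) by ring,
        PySem.List.pyRange_one_succ_right (a := 1) (b := (m : Int) + 1 + 1) (by omega),
        List.foldl_append]
    push_cast at ih
    simp only [List.foldl_cons, List.foldl_nil]
    rw [ih h1]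
    have he : ∀ x : Int, PySem.Int.floordiv (x * (x + 1)) 2 * 2 = x * (x + 1) := by
      intro x
      obtain ⟨k, hk⟩ := Int.even_mul_succ_self x
      rw [show x * (x + 1) = 2 * k by omega, PySem.Int.floordiv,
        Int.mul_fdiv_cancel_left _ (by norm_num)]
      ring
    have e1 := he ((m : Int) + 1)
    have e2 := he ((m : Int) + 1 + 1)
    ring_nf at e1 e2 ⊢
    linarith

-- twice a triangular number
theorem two_tri (x : Int) : PySem.Int.floordiv (x * (x + 1)) 2 * 2 = x * (x + 1) := by
  obtain ⟨k, hk⟩ := Int.even_mul_succ_self x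
  rw [show x * (x + 1) = 2 * k by omega, PySem.Int.floordiv,
    Int.mul_fdiv_cancel_left _ (by norm_num)]
  ring

-- A's accumulator is absorbed by 0
theorem foldl_mul_zero (g : Int → Int) (l : List Int) :
    l.foldl (fun t i => t * g i) 0 = 0 := by
  induction l with
  | nil => rfl
  | cons x xs ih => simpa using ih

-- the key identity: (prod of T(i), i in [a, a+m]) * (a * (a+m+1) * 2^(m+1))
--                 = (prod of i, i in [a, a+m+1])^2
theorem tri_prod_sq (a : Int) (ha : 1 ≤ a) (m : ℕ) :
    ((PySem.List.pyRange a (a + m + 1) 1).foldl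
        (fun t i => t * PySem.Int.floordiv (i * (i + 1)) 2) 1)
      * (a * (a + m + 1) * 2 ^ (m + 1))
    = ((PySem.List.pyRange a (a + m + 2) 1).foldl (fun p i => p * i) 1) ^ 2 := by
  induction m with
  | zero =>
    rw [show a + (0 : ℕ) + 1 = a + 1 by push_cast; ring,
        show a + (0 : ℕ) + 2 = (a + 1) + 1 by push_cast; ring,
        PySem.List.pyRange_one_succ_right (le_refl a),
        PySem.List.pyRange_one_succ_right (by omega : a ≤ a + 1),
        PySem.List.pyRange_one_succ_right (le_refl a),
        PySem.List.pyRange_one_eq_nil (le_refl a)]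
    simp only [List.foldl_append, List.foldl_cons, List.foldl_nil]
    have hT := two_tri a
    linear_combination (a * (a + 1)) * hT
  | succ m ih =>
    have hx : a ≤ a + m + 1 := by push_cast; omega
    rw [show a + ((m : ℕ) + 1 : ℕ) + 1 = (a + m + 1) + 1 by push_cast; ring,
        show a + ((m : ℕ) + 1 : ℕ) + 2 = (a + m + 2) + 1 by push_cast; ring,
        PySem.List.pyRange_one_succ_right hx,
        PySem.List.pyRange_one_succ_right (by push_cast; omega : a ≤ a + m + 2)]
    simp only [List.foldl_append, List.foldl_cons, List.foldl_nil]
    set Q := (PySem.List.pyRange a (a + m + 1) 1).foldl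
        (fun t i => t * PySem.Int.floordiv (i * (i + 1)) 2) 1 with hQ
    set P := (PySem.List.pyRange a (a + m + 2) 1).foldl (fun p i => p * i) 1 with hP
    have hT := two_tri (a + m + 1)
    set T := PySem.Int.floordiv ((a + m + 1) * (a + m + 1 + 1)) 2 with hTdef
    have hc : ((a : Int) + m + 1) ≠ 0 := by push_cast; omega
    apply mul_right_cancel₀ hc
    have e2 : (2 : Int) ^ (m + 1 + 1) = 2 ^ (m + 1) * 2 := by ring
    rw [e2]
    linear_combination (2 * T * (a + (m : Int) + 1 + 1)) * ih + (P ^ 2 * (a + (m : Int) + 1 + 1)) * hT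

-- ===== VERDICT =====
theorem oper_spec : Claim_equal_oper := by
  intro a b _
  show oper a b = oper_alt a b
  unfold oper oper_alt
  by_cases hba : b < a
  · rw [if_pos hba, PySem.List.pyRange_one_eq_nil (by omega)]
    rfl
  · rw [if_neg hba]
    by_cases ha : a ≤ 0
    · rw [if_pos ha, PySem.List.pyRange_one_cons (by omega)]
      simp only [List.foldl_cons]
      rw [PySem.List.pyRange_one_eq_nil (by omega)]
      simpa using foldl_mul_zero _ _
    · rw [if_neg ha]
      show _ = PySem.Int.floordiv
          (((PySem.List.pyRange a (b + 2) 1).foldl (fun p i => p * i) 1) *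
           ((PySem.List.pyRange a (b + 2) 1).foldl (fun p i => p * i) 1))
          (a * (b + 1) * 2 ^ (b - a + 1).toNat)
      -- rewrite A's inner sums to triangular numbers
      have hA : (PySem.List.pyRange a (b + 1) 1).foldl
            (fun total i =>
              total * ((PySem.List.pyRange 1 (i + 1) 1).foldl (fun plus j => plus + j) 0)) 1
          = (PySem.List.pyRange a (b + 1) 1).foldl
            (fun t i => t * PySem.Int.floordiv (i * (i + 1)) 2) 1 :=
        by
          apply PySem.List.foldl_congr_mem
          intro acc x hx
          rw [inner_sum_closed x
            (by have := (PySem.List.mem_pyRange_one.mp hx).1; omega)]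
      rw [hA]
      obtain ⟨m, hm⟩ : ∃ m : ℕ, b = a + m := ⟨(b - a).toNat, by omega⟩
      subst hm
      rw [show ((a : Int) + ↑m - a + 1).toNat = m + 1 by omega]
      have key := tri_prod_sq a (by omega) m
      set Q := (PySem.List.pyRange a (a + ↑m + 1) 1).foldl
          (fun t i => t * PySem.Int.floordiv (i * (i + 1)) 2) 1 with hQ
      set P := (PySem.List.pyRange a (a + ↑m + 2) 1).foldl (fun p i => p * i) 1 with hP
      rw [show P * P = Q * (a * (a + (m : Int) + 1) * 2 ^ (m + 1)) from by
            rw [key]; ring]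
      rw [PySem.Int.floordiv, Int.mul_fdiv_cancel _ (by
            have h2 : (0 : Int) < 2 ^ (m + 1) := by positivity
            have h1 : (0 : Int) < a := by omega
            have h3 : (0 : Int) < a + (m : Int) + 1 := by omega
            exact ne_of_gt (mul_pos (mul_pos h1 h3) h2))]
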